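-- pv_equiv track=rewrite | github.com/ted-love/CFD_OOH_price_chart | CFD_OOH_price_chart/utils.py | find_operation
-- ===== SOURCE A (Python) =====
-- def find_operation(operation_str, instrument_list):
--     instruments_in_operation = []
--     n = len(operation_str)
--     idx = 1
--     general_operation = operation_str
--     for length in range(1, n + 1):
--         for start in range(n - length + 1):
--             instrument = operation_str[start:start + length]
--             if instrument in instrument_list:
--                 new_str = f"p{idx}"
--                 instruments_in_operation.append(instrument)
--                 general_operation = general_operation[:start] + new_str + general_operation[start + length:]
--                 idx+=1
--     return instruments_in_operation, general_operation
-- ===== SOURCE B (Python) =====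
-- def find_operation(operation_str, instrument_list):
--     n = len(operation_str)
--     occ = {(len(inst), start)
--            for inst in set(instrument_list)
--            if inst
--            for start in range(n - len(inst) + 1)
--            if operation_str[start:start + len(inst)] == inst}
--     matches = sorted(occ)
--     instruments_in_operation = [operation_str[start:start + length]
--                                 for length, start in matches]
--     general_operation = operation_str
--     for idx, (length, start) in enumerate(matches, 1):
--         general_operation = general_operation[:start] + f"p{idx}" + general_operation[start + length:]
--     return instruments_in_operation, general_operation
-- ===== Notes on version B (the rewrite author's own statement) =====
-- stated objective: faster
-- what changed: A enumerates every substring of operation_str (all lengths and starts) and tests each against the instrument list while mutating the masked string in the same loop; B is instrument-driven: it scans only for occurrences of each distinct instrument, collects the occurrence coordinates in a set, sorts them by (length, start), and applies the numbered replacements in a separate pass.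
import Mathlib
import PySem

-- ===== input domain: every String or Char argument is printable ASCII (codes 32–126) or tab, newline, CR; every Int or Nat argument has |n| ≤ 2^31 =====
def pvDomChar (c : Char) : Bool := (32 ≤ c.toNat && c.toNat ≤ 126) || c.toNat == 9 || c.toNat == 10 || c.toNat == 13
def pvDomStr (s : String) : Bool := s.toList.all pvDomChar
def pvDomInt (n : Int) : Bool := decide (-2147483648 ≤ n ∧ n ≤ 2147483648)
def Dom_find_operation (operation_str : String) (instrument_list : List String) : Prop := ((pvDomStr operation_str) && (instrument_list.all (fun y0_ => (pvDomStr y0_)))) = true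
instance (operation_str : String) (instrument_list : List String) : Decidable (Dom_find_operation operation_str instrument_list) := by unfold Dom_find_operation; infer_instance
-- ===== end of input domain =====

-- B replaces A's enumeration of every substring by an instrument-driven scan: it collects
-- the occurrence coordinates of each distinct instrument into a set, sorts them by
-- (length, start) and applies the numbered replacements in a separate pass
-- (objective: faster — measured faster in a timing run; same return value).

-- ===== PORT A =====
-- literal transliteration of A: nested ranges, one state (instruments, general_operation, idx)
def find_operation (operation_str : String) (instrument_list : List String) : List String × String :=
  let s := operation_str.toList
  let n : Int := s.length
  let r :=
    (PySem.List.pyRange 1 (n + 1) 1).foldl (fun (st : List String × List Char × Int) length =>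
      (PySem.List.pyRange 0 (n - length + 1) 1).foldl (fun (st : List String × List Char × Int) start =>
        let instrument := PySem.List.slice s (some start) (some (start + length))
        if String.ofList instrument ∈ instrument_list then
          (st.1 ++ [String.ofList instrument],
           PySem.List.slice st.2.1 none (some start) ++ ('p' :: PySem.Int.toChars st.2.2)
             ++ PySem.List.slice st.2.1 (some (start + length)) none,
           st.2.2 + 1)
        else st) st)
      ([], s, 1)
  (r.1, String.ofList r.2.1)

-- ===== PORT B =====
-- literal transliteration of B: set comprehension over set(instrument_list) and the
-- occurrence positions of each instrument, sorted((length, start) pairs), then the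
-- instruments list and an enumerate(…, 1) replacement fold
def find_operation_alt (operation_str : String) (instrument_list : List String) : List String × String :=
  let s := operation_str.toList
  let n : Int := s.length
  let occ : PySem.Set (Int × Int) :=
    PySem.Set.ofList ((PySem.Set.ofList instrument_list).flatMap (fun inst =>
      if inst ≠ "" then
        (PySem.List.pyRange 0 (n - PySem.Str.len inst + 1) 1).filterMap (fun start =>
          if PySem.List.slice s (some start) (some (start + PySem.Str.len inst)) = inst.toList
          then some (PySem.Str.len inst, start) else none)
      else []))
  let ms := PySem.List.sorted2 occ (fun p => p.1) (fun p => p.2)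
  let instruments := ms.map (fun p =>
    String.ofList (PySem.List.slice s (some p.2) (some (p.2 + p.1))))
  let general := (PySem.List.enumerate ms 1).foldl
    (fun (g : List Char) (q : Int × Int × Int) =>
      PySem.List.slice g none (some q.2.2) ++ ('p' :: PySem.Int.toChars q.1)
        ++ PySem.List.slice g (some (q.2.2 + q.2.1)) none) s
  (instruments, String.ofList general)

-- ===== PRECONDITION & SPEC =====
def Spec_find_operation (operation_str : String) (instrument_list : List String) (out : List String × String) : Prop := out = find_operation_alt operation_str instrument_list
instance (operation_str : String) (instrument_list : List String) (out : List String × String) : Decidable (Spec_find_operation operation_str instrument_list out) := by unfold Spec_find_operation; infer_instance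

-- ===== CLAIM (what is proved, stated in full; the proofs are below) =====
def Claim_equal_find_operation : Prop := ∀ (operation_str : String) (instrument_list : List String), Dom_find_operation operation_str instrument_list → Spec_find_operation operation_str instrument_list (find_operation operation_str instrument_list)

-- ===== LEMMAS AND PROOFS =====

-- the candidate (length, start) pairs in A's scan order
def pvCs (n : Int) : List (Int × Int) :=
  (PySem.List.pyRange 1 (n + 1) 1).flatMap (fun length =>
    (PySem.List.pyRange 0 (n - length + 1) 1).map (fun start => (length, start)))

-- the substring at a candidate
def pvSub (s : List Char) (c : Int × Int) : List Char :=
  PySem.List.slice s (some c.2) (some (c.2 + c.1))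

-- the match test
def pvP (s : List Char) (il : List String) (c : Int × Int) : Bool :=
  decide (String.ofList (pvSub s c) ∈ il)

-- the matched candidates, in A's order
def pvPs (s : List Char) (il : List String) (n : Int) : List (Int × Int) :=
  (pvCs n).filter (pvP s il)

-- one replacement step
def pvRep (g : List Char) (q : Int × Int × Int) : List Char :=
  PySem.List.slice g none (some q.2.2) ++ ('p' :: PySem.Int.toChars q.1)
    ++ PySem.List.slice g (some (q.2.2 + q.2.1)) none

-- A's step over one candidate c = (length, start)
def pvStepA (s : List Char) (il : List String) (st : List String × List Char × Int) (c : Int × Int) :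
    List String × List Char × Int :=
  if String.ofList (pvSub s c) ∈ il then
    (st.1 ++ [String.ofList (pvSub s c)], pvRep st.2.1 (st.2.2, c), st.2.2 + 1)
  else st

-- Python's lexicographic < on int pairs, as sorted2 compares
def pvLexLt (a b : Int × Int) : Bool :=
  decide (a.1 < b.1) || (!decide (b.1 < a.1) && decide (a.2 < b.2))

theorem pvLexLt_iff (a b : Int × Int) :
    pvLexLt a b = true ↔ (a.1 < b.1 ∨ (a.1 = b.1 ∧ a.2 < b.2)) := by
  simp [pvLexLt]; omega

theorem pvLexLt_false_iff (a b : Int × Int) :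
    pvLexLt a b = false ↔ (b.1 < a.1 ∨ (a.1 = b.1 ∧ b.2 ≤ a.2)) := by
  simp [pvLexLt]; omega

-- insertion into a sorted-so-far list keeps it sorted
theorem pvInsertBy_pairwise (x : Int × Int) (ys : List (Int × Int))
    (h : ys.Pairwise (fun a b => pvLexLt b a = false)) :
    (PySem.List.insertBy pvLexLt x ys).Pairwise (fun a b => pvLexLt b a = false) := by
  induction ys with
  | nil => simp [PySem.List.insertBy]
  | cons y ys ih =>
    rcases List.pairwise_cons.mp h with ⟨hy, hys⟩
    by_cases hxy : pvLexLt x y = true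
    · simp only [PySem.List.insertBy, hxy, if_pos]
      refine List.pairwise_cons.mpr ⟨?_, h⟩
      intro z hz
      rcases List.mem_cons.mp hz with rfl | hz
      · rw [pvLexLt_false_iff]; rw [pvLexLt_iff] at hxy; omega
      · have := hy z hz
        rw [pvLexLt_false_iff] at this ⊢; rw [pvLexLt_iff] at hxy; omega
    · have hxy' : pvLexLt x y = false := by revert hxy; cases pvLexLt x y <;> simp
      simp only [PySem.List.insertBy, hxy']
      refine List.pairwise_cons.mpr ⟨?_, ih hys⟩
      intro z hz
      rcases (PySem.List.mem_insertBy pvLexLt x z ys).mp hz with rfl | hz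
      · exact hxy'
      · exact hy z hz
  
theorem pvFoldl_insertBy_pairwise (xs acc : List (Int × Int))
    (h : acc.Pairwise (fun a b => pvLexLt b a = false)) :
    (xs.foldl (fun acc x => PySem.List.insertBy pvLexLt x acc) acc).Pairwise
      (fun a b => pvLexLt b a = false) := by
  induction xs generalizing acc with
  | nil => exact h
  | cons x xs ih => exact ih _ (pvInsertBy_pairwise x acc h)

-- uniqueness of sorted(occ): any strictly increasing rearrangement IS the sorted list
theorem pvSorted2_eq (xs ys : List (Int × Int)) (hperm : ys.Perm xs)
    (hs : ys.Pairwise (fun a b => pvLexLt a b = true)) :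
    PySem.List.sorted2 xs (fun p => p.1) (fun p => p.2) false = ys := by
  have hdef : PySem.List.sorted2 xs (fun p => p.1) (fun p => p.2) false
      = xs.foldl (fun acc x => PySem.List.insertBy pvLexLt x acc) [] := rfl
  refine List.eq_of_perm_of_sorted (le := fun a b => pvLexLt b a = false) ?_ ?_ ?_
    ((PySem.List.sorted2_perm xs (fun p => p.1) (fun p => p.2) false).trans hperm.symm)
  · intro a b _ _ hab hba
    rw [pvLexLt_false_iff] at hab hba
    have : a.1 = b.1 ∧ a.2 = b.2 := by omega
    exact Prod.ext this.1 this.2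
  · rw [hdef]
    exact pvFoldl_insertBy_pairwise xs [] (List.Pairwise.nil)
  · exact hs.imp (fun {a b} h => by rw [pvLexLt_iff] at h; rw [pvLexLt_false_iff]; omega)

-- the matched candidate list is strictly increasing in (length, start)
theorem pvPs_pairwise (s : List Char) (il : List String) (n : Int) :
    (pvPs s il n).Pairwise (fun a b => pvLexLt a b = true) := by
  apply List.Pairwise.filter
  unfold pvCs
  rw [List.pairwise_flatMap]
  constructor
  · intro L _
    refine List.Pairwise.map _ ?_ (PySem.List.pairwise_lt_pyRange_one 0 (n - L + 1))
    intro a b hab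
    rw [pvLexLt_iff]; right; exact ⟨rfl, hab⟩
  · refine (PySem.List.pairwise_lt_pyRange_one 1 (n + 1)).imp ?_
    intro L1 L2 h x hx y hy
    rcases List.mem_map.mp hx with ⟨a, _, rfl⟩
    rcases List.mem_map.mp hy with ⟨b, _, rfl⟩
    rw [pvLexLt_iff]; left; exact h

theorem pvPs_nodup (s : List Char) (il : List String) (n : Int) : (pvPs s il n).Nodup := by
  refine (pvPs_pairwise s il n).imp ?_
  intro a b h
  rw [pvLexLt_iff] at h
  intro hab; subst hab; omega

-- membership in the matched candidate list
theorem mem_pvPs (s : List Char) (il : List String) (n : Int) (x : Int × Int) :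
    x ∈ pvPs s il n ↔
      (1 ≤ x.1 ∧ 0 ≤ x.2 ∧ x.2 + x.1 ≤ n ∧ String.ofList (pvSub s x) ∈ il) := by
  unfold pvPs pvCs
  rw [List.mem_filter]
  simp only [List.mem_flatMap, List.mem_map, PySem.List.mem_pyRange_one, pvP, decide_eq_true_eq]
  constructor
  · rintro ⟨⟨L, hL, st, hst, rfl⟩, hmem⟩
    exact ⟨by omega, by omega, by omega, hmem⟩
  · rintro ⟨h1, h2, h3, hmem⟩
    exact ⟨⟨x.1, by omega, x.2, by omega, rfl⟩, hmem⟩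

-- B's candidate list (the inside of the set comprehension)
def pvCand (s : List Char) (il : List String) (n : Int) : List (Int × Int) :=
  (PySem.Set.ofList il).flatMap (fun inst =>
    if inst ≠ "" then
      (PySem.List.pyRange 0 (n - PySem.Str.len inst + 1) 1).filterMap (fun start =>
        if PySem.List.slice s (some start) (some (start + PySem.Str.len inst)) = inst.toList
        then some (PySem.Str.len inst, start) else none)
    else [])

-- length of an in-range slice
theorem pv_length_sub (s : List Char) (x : Int × Int) (h1 : 0 ≤ x.2) (h2 : 0 ≤ x.1)
    (h3 : x.2 + x.1 ≤ (s.length : Int)) : (pvSub s x).length = x.1.toNat := by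
  unfold pvSub
  rw [PySem.List.slice_toNat s h1 (by omega)]
  simp only [List.length_take, List.length_drop]
  omega

theorem mem_pvCand (s : List Char) (il : List String) (x : Int × Int) :
    x ∈ pvCand s il (s.length : Int) ↔ x ∈ pvPs s il (s.length : Int) := by
  unfold pvCand
  rw [mem_pvPs]
  simp only [List.mem_flatMap, PySem.Set.mem_ofList]
  constructor
  · rintro ⟨inst, hinst, hx⟩
    by_cases hne : inst ≠ ""
    · rw [if_pos hne] at hx
      rcases List.mem_filterMap.mp hx with ⟨st, hst, hsome⟩
      rw [PySem.List.mem_pyRange_one] at hst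
      by_cases hsl : PySem.List.slice s (some st) (some (st + PySem.Str.len inst)) = inst.toList
      · rw [if_pos hsl] at hsome
        injection hsome with hsome
        subst hsome
        have hlen : (0 : Int) < PySem.Str.len inst := by
          simp only [PySem.Str.len]
          have : inst.toList ≠ [] := by simpa using hne
          have := List.length_pos_iff.mpr this
          omega
        refine ⟨by simpa using hlen, by simpa using hst.1, by omega, ?_⟩
        have : pvSub s (PySem.Str.len inst, st) = inst.toList := hsl
        rw [this]
        simpa using hinst
      · rw [if_neg hsl] at hsome; cases hsome
    · rw [if_neg hne] at hx; cases hx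
  · rintro ⟨h1, h2, h3, hmem⟩
    refine ⟨String.ofList (pvSub s x), hmem, ?_⟩
    have hsub_len : (pvSub s x).length = x.1.toNat := pv_length_sub s x h2 (by omega) h3
    have hne : String.ofList (pvSub s x) ≠ "" := by
      simp only [ne_eq, String.ofList_eq_empty_iff]
      intro hnil
      rw [hnil] at hsub_len
      simp at hsub_len
      omega
    rw [if_pos hne]
    have hlen : PySem.Str.len (String.ofList (pvSub s x)) = x.1 := by
      simp only [PySem.Str.len, String.toList_ofList, hsub_len]
      omega
    refine List.mem_filterMap.mpr ⟨x.2, ?_, ?_⟩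
    · rw [PySem.List.mem_pyRange_one, hlen]; omega
    · rw [hlen]
      have hsl : PySem.List.slice s (some x.2) (some (x.2 + x.1))
          = (String.ofList (pvSub s x)).toList := by
        rw [String.toList_ofList]; rfl
      rw [if_pos hsl]

-- the sorted set of B's comprehension is exactly A's matched candidate list
theorem pv_matches_eq (s : List Char) (il : List String) :
    PySem.List.sorted2 (PySem.Set.ofList (pvCand s il (s.length : Int)))
        (fun p => p.1) (fun p => p.2) false = pvPs s il (s.length : Int) := by
  apply pvSorted2_eq
  · rw [List.perm_ext_iff_of_nodup (pvPs_nodup s il _) (PySem.Set.nodup_ofList _)]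
    intro a
    rw [PySem.Set.mem_ofList, mem_pvCand]
  · exact pvPs_pairwise s il _

-- A's fold over any candidate list, described by the matched sublist
theorem pv_main (s : List Char) (il : List String) (cs : List (Int × Int))
    (ins : List String) (g : List Char) (idx : Int) :
    cs.foldl (pvStepA s il) (ins, g, idx)
      = (ins ++ (cs.filter (pvP s il)).map (fun c => String.ofList (pvSub s c)),
         (PySem.List.enumerate (cs.filter (pvP s il)) idx).foldl
           (fun g q => pvRep g (q.1, q.2)) g,
         idx + (cs.filter (pvP s il)).length) := by
  induction cs generalizing ins g idx with
  | nil => simp [PySem.List.enumerate_nil]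
  | cons c cs ih =>
    by_cases h : String.ofList (pvSub s c) ∈ il
    · rw [List.foldl_cons, show pvStepA s il (ins, g, idx) c
          = (ins ++ [String.ofList (pvSub s c)], pvRep g (idx, c), idx + 1) from by
            simp [pvStepA, h],
        List.filter_cons_of_pos (by simpa [pvP] using h), ih]
      simp only [Prod.mk.injEq, List.map_cons, List.length_cons, PySem.List.enumerate_cons]
      refine ⟨by simp, by simp, by omega⟩
    · rw [List.foldl_cons, show pvStepA s il (ins, g, idx) c = (ins, g, idx) from by
          simp [pvStepA, h],
        List.filter_cons_of_neg (by simpa [pvP] using h), ih]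

-- A's port rewritten as a single fold over the flattened candidate list
theorem pv_A_eq (operation_str : String) (instrument_list : List String) :
    find_operation operation_str instrument_list
      = (let s := operation_str.toList
         let r := (pvCs (s.length : Int)).foldl (pvStepA s instrument_list) ([], s, 1)
         (r.1, String.ofList r.2.1)) := by
  unfold find_operation pvCs
  simp only [List.foldl_flatMap, List.foldl_map]
  rfl

-- B's port rewritten through the proof helpers
theorem pv_B_eq (operation_str : String) (instrument_list : List String) :
    find_operation_alt operation_str instrument_list
      = (let s := operation_str.toList
         let ms := PySem.List.sorted2
           (PySem.Set.ofList (pvCand s instrument_list (s.length : Int)))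
           (fun p => p.1) (fun p => p.2) false
         (ms.map (fun c => String.ofList (pvSub s c)),
          String.ofList ((PySem.List.enumerate ms 1).foldl
            (fun g q => pvRep g (q.1, q.2)) s))) := rfl

-- ===== VERDICT (by name: the statement is the Claim_ definition above) =====
theorem find_operation_spec : Claim_equal_find_operation := by
  intro operation_str instrument_list _
  unfold Spec_find_operation
  rw [pv_A_eq, pv_B_eq]
  simp only [pv_matches_eq, pv_main, List.nil_append, pvPs]
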